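-- pv_equiv track=rewrite | github.com/jangseungwon08/coding-test | 프로그래머스/1/134240. 푸드 파이트 대회/푸드 파이트 대회.py | solution
-- ===== SOURCE A (Python) =====
-- def solution(food):
--     answer = ''
--     #1부터 len(food)-1 까지
--     for i in range(1,len(food)):
--         #food i번째 인덱스value값이 2이상이면
--         if food[i] >= 2:
--             #str(i)를 food[i] //2 의 값만큼 반복
--             answer += str(i)*(food[i] // 2)
--     #중간에 0이 들어가야되니까 0 추가
--     answer += str(0)
--     #역순으로 range(len(food)-1)은 food의 길이가 예시에서 4니까 인덱스로 접근하려면 3부터 시작해야된다. 따라서 len(food)-1을 해줘서 3을 만들어준다. 1까지 -1만큼 감소시킨다.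
--     for j in range(len(food)-1,0,-1):
--         if food[j] >= 2:
--             answer += str(j)*(food[j] // 2)
--     return answer
-- ===== SOURCE B (Python) =====
-- def solution(food):
--     parts = ['0']
--     for i in range(len(food) - 1, 0, -1):
--         block = str(i) * (food[i] // 2)
--         parts.insert(0, block)
--         parts.append(block)
--     return ''.join(parts)
-- ===== Notes on version B (the rewrite author's own statement) =====
-- stated objective: alternative
-- what changed: B builds the palindrome from the center outwards in a single descending loop, growing a parts list at both ends around '0' and joining once, with no guard, instead of A's two guarded string-concatenation scans (ascending then descending).
import Mathlib
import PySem

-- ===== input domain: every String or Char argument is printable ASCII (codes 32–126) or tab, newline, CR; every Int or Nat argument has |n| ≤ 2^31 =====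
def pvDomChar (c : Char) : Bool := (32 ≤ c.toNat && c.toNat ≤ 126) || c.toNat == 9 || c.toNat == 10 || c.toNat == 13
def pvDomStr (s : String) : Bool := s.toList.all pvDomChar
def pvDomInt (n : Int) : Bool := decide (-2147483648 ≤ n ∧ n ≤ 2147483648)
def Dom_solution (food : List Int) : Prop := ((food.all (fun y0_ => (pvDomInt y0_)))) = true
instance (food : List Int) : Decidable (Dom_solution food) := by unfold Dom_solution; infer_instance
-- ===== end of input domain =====

-- B builds the palindrome from the center outwards: one descending loop growing a parts list
-- at both ends around '0', joined once — instead of A's two concatenation loops: an alternative decomposition.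

-- ===== PORT A =====
def solution (food : List Int) : String :=
  let n : Int := (food.length : Int)
  let answer : List Char :=
    (PySem.List.pyRange 1 n 1).foldl (fun acc i =>
      if PySem.List.pyGetD food i 0 ≥ 2 then
        acc ++ PySem.List.pyRepeat (PySem.Int.toChars i) (PySem.Int.floordiv (PySem.List.pyGetD food i 0) 2)
      else acc) []
  let answer := answer ++ PySem.Int.toChars 0
  let answer :=
    (PySem.List.pyRange (n - 1) 0 (-1)).foldl (fun acc j =>
      if PySem.List.pyGetD food j 0 ≥ 2 then
        acc ++ PySem.List.pyRepeat (PySem.Int.toChars j) (PySem.Int.floordiv (PySem.List.pyGetD food j 0) 2)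
      else acc) answer
  String.mk answer

-- ===== PORT B =====
def solution_alt (food : List Int) : String :=
  let parts : List (List Char) := [PySem.Int.toChars 0]
  let parts :=
    (PySem.List.pyRange ((food.length : Int) - 1) 0 (-1)).foldl (fun parts i =>
      let block := PySem.List.pyRepeat (PySem.Int.toChars i)
                     (PySem.Int.floordiv (PySem.List.pyGetD food i 0) 2)
      [block] ++ parts ++ [block]) parts
  String.mk (PySem.Chars.join [] parts)

-- ===== PRECONDITION & SPEC =====
def Spec_solution (food : List Int) (out : String) : Prop := out = solution_alt food
instance (food : List Int) (out : String) : Decidable (Spec_solution food out) := by unfold Spec_solution; infer_instance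

-- ===== CLAIM (what is proved, stated in full; the proofs are below) =====
def Claim_equal_solution : Prop := ∀ (food : List Int), Dom_solution food → Spec_solution food (solution food)

-- ===== LEMMAS AND PROOFS =====

-- the block A appends at index i (with A's >= 2 guard)
def pvBlkA (food : List Int) (i : Int) : List Char :=
  if PySem.List.pyGetD food i 0 ≥ 2 then
    PySem.List.pyRepeat (PySem.Int.toChars i) (PySem.Int.floordiv (PySem.List.pyGetD food i 0) 2)
  else []

-- A's guard is redundant: when food[i] < 2, food[i]//2 ≤ 0 and the repetition is empty anyway
theorem pvBlkA_eq_unguarded (food : List Int) (i : Int) :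
    pvBlkA food i
      = PySem.List.pyRepeat (PySem.Int.toChars i) (PySem.Int.floordiv (PySem.List.pyGetD food i 0) 2) := by
  unfold pvBlkA
  split
  · rfl
  · rename_i h
    have hle : (PySem.List.pyGetD food i 0).fdiv 2 ≤ 0 := by
      rw [Int.fdiv_eq_ediv]
      omega
    simp [PySem.List.pyRepeat, PySem.Int.floordiv, Int.toNat_of_nonpos hle]

-- A's guarded append loop, as a flatMap of pvBlkA
theorem pvLoop_eq_flatMap (food : List Int) (l : List Int) (acc : List Char) :
    l.foldl (fun acc i =>
      if PySem.List.pyGetD food i 0 ≥ 2 then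
        acc ++ PySem.List.pyRepeat (PySem.Int.toChars i) (PySem.Int.floordiv (PySem.List.pyGetD food i 0) 2)
      else acc) acc
    = acc ++ l.flatMap (pvBlkA food) := by
  have hfun : (fun (acc : List Char) (i : Int) =>
      if PySem.List.pyGetD food i 0 ≥ 2 then
        acc ++ PySem.List.pyRepeat (PySem.Int.toChars i) (PySem.Int.floordiv (PySem.List.pyGetD food i 0) 2)
      else acc)
      = (fun acc i => acc ++ pvBlkA food i) := by
    funext acc i; unfold pvBlkA; split <;> simp
  rw [hfun, PySem.List.foldl_append_eq_flatMap]

-- ''.join(parts) with empty separator is concatenation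
theorem pvJoin_nil (bs : List (List Char)) : PySem.Chars.join [] bs = bs.flatten := by
  induction bs with
  | nil => rfl
  | cons b bs ih =>
    cases bs with
    | nil => simp [PySem.Chars.join, List.intercalate]
    | cons c cs =>
      simp only [PySem.Chars.join, List.intercalate] at ih ⊢
      simp_all [List.intersperse]

-- B's center-out loop: after processing l, parts = reversed blocks ++ old parts ++ blocks
theorem pvCenterOut (b : Int → List Char) (l : List Int) (parts : List (List Char)) :
    l.foldl (fun parts i => [b i] ++ parts ++ [b i]) parts
      = (l.reverse.map b) ++ parts ++ l.map b := by
  induction l generalizing parts with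
  | nil => simp
  | cons x xs ih =>
    rw [List.foldl_cons, ih]
    simp [List.append_assoc]

-- ===== VERDICT (by name: the statement is the Claim_ definition above) =====
theorem solution_spec : Claim_equal_solution := by
  intro food _
  unfold Spec_solution solution solution_alt
  have hrev : PySem.List.pyRange ((food.length : Int) - 1) 0 (-1)
      = (PySem.List.pyRange 1 (food.length : Int) 1).reverse := by
    simpa using PySem.List.pyRange_neg_one_eq_reverse ((food.length : Int) - 1) 0
  simp only [pvLoop_eq_flatMap]
  simp only [← pvBlkA_eq_unguarded]
  rw [pvCenterOut (pvBlkA food), pvJoin_nil, hrev, List.reverse_reverse]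
  simp [List.flatMap_def, List.append_assoc]
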